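-- pv_equiv track=rewrite | github.com/meti-liu/python-and-Discrete-Math | Lab3/2.1.py | isInducedSubGraph
-- ===== SOURCE A (Python) =====
-- def isGraph(V, E):
--     for edge in E:
--         if edge[0] not in V or edge[1] not in V:
--             return False
--     return True
--
-- def isSubGraph(V, E, Vs, Es):
--     if not isGraph(Vs, Es):
--         return False
--     for v in Vs:
--         if v not in V:
--             return False
--     for e in Es:
--         if e not in E:
--             return False
--     return True
--
-- def isInducedSubGraph(V, E, Vs, Es):
--     if not isSubGraph(V, E, Vs, Es):
--         return False
--
--     # 检查 Vs 中的每一对顶点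
--     for v1 in Vs:
--         for v2 in Vs:
--             if v1 != v2:
--                 edge_in_original = (v1, v2) in E or (v2, v1) in E
--                 edge_in_subgraph = (v1, v2) in Es or (v2, v1) in Es
--
--                 # 如果 v1 和 v2 在原图中有边，但在子图中没有边，返回 False
--                 if edge_in_original and not edge_in_subgraph:
--                     return False
--     return True
-- ===== SOURCE B (Python) =====
-- def isInducedSubGraph(V, E, Vs, Es):
--     vset = set(Vs)
--     if not vset.issubset(set(V)):
--         return False
--     if not all(a in vset and b in vset for (a, b) in Es):
--         return False
--     esset = set(Es)
--     if not esset.issubset(set(E)):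
--         return False
--     for (a, b) in E:
--         if a != b and a in vset and b in vset \
--                 and (a, b) not in esset and (b, a) not in esset:
--             return False
--     return True
-- ===== Notes on version B (the rewrite author's own statement) =====
-- stated objective: alternative
-- what changed: Replaces the nested Vs×Vs double loop with list-membership scans inside by a single pass over the edge list E with set-based lookups for Vs and Es (and set-based subset checks); on random inputs A exits early so B is not measurably faster.
import Mathlib
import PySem

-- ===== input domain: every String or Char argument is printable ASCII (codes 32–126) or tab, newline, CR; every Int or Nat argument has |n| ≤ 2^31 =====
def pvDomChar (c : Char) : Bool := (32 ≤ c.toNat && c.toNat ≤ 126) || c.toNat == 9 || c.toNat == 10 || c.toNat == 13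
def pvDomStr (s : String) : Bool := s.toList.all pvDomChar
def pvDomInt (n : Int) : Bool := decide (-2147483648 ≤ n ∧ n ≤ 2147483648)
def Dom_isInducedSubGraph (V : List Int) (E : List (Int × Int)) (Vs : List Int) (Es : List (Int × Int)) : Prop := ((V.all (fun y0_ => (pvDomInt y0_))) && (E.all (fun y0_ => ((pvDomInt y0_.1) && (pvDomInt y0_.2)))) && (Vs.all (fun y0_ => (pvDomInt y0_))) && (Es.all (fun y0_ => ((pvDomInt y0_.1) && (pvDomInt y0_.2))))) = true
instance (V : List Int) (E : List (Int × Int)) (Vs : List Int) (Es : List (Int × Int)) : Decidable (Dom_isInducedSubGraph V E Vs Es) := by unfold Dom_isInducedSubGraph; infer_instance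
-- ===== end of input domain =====

-- B replaces A's nested Vs×Vs double loop (with list scans of E and Es inside) by one pass
-- over the edge list E using set-based membership for Vs and Es; same Boolean result.


-- ===== PORT A =====
def isGraphA (V : List Int) (E : List (Int × Int)) : Bool :=
  E.all (fun e => V.contains e.1 && V.contains e.2)

def isSubGraphA (V : List Int) (E : List (Int × Int)) (Vs : List Int) (Es : List (Int × Int)) : Bool :=
  if !isGraphA Vs Es then false
  else if !Vs.all (fun v => V.contains v) then false
  else Es.all (fun e => E.contains e)

def isInducedSubGraph (V : List Int) (E : List (Int × Int)) (Vs : List Int) (Es : List (Int × Int)) : Bool :=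
  if !isSubGraphA V E Vs Es then false
  else
    Vs.all (fun v1 => Vs.all (fun v2 =>
      if v1 ≠ v2 then
        !((E.contains (v1, v2) || E.contains (v2, v1)) &&
          !(Es.contains (v1, v2) || Es.contains (v2, v1)))
      else true))

-- ===== PORT B =====
def isInducedSubGraph_alt (V : List Int) (E : List (Int × Int)) (Vs : List Int) (Es : List (Int × Int)) : Bool :=
  let vset := PySem.Set.ofList Vs
  if !PySem.Set.issubset vset (PySem.Set.ofList V) then false
  else if !Es.all (fun e => PySem.Set.contains vset e.1 && PySem.Set.contains vset e.2) then false
  else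
    let esset := PySem.Set.ofList Es
    if !PySem.Set.issubset esset (PySem.Set.ofList E) then false
    else
      E.all (fun e =>
        !(e.1 != e.2 && PySem.Set.contains vset e.1 && PySem.Set.contains vset e.2 &&
          !PySem.Set.contains esset (e.1, e.2) && !PySem.Set.contains esset (e.2, e.1)))

-- ===== PRECONDITION & SPEC =====
def Spec_isInducedSubGraph (V : List Int) (E : List (Int × Int)) (Vs : List Int) (Es : List (Int × Int)) (out : Bool) : Prop := out = isInducedSubGraph_alt V E Vs Es
instance (V : List Int) (E : List (Int × Int)) (Vs : List Int) (Es : List (Int × Int)) (out : Bool) : Decidable (Spec_isInducedSubGraph V E Vs Es out) := by unfold Spec_isInducedSubGraph; infer_instance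

-- ===== CLAIM (what is proved, stated in full; the proofs are below) =====
def Claim_equal_isInducedSubGraph : Prop := ∀ (V : List Int) (E : List (Int × Int)) (Vs : List Int) (Es : List (Int × Int)), Dom_isInducedSubGraph V E Vs Es → Spec_isInducedSubGraph V E Vs Es (isInducedSubGraph V E Vs Es)

-- ===== LEMMAS AND PROOFS =====

-- Both ports reduce to the same four conditions; A's pair loop over Vs×Vs and B's single
-- pass over E express the same induced-edge requirement (both skip self-loops and test
-- both orientations in Es).
theorem isInducedSubGraph_eq_alt (V : List Int) (E : List (Int × Int)) (Vs : List Int) (Es : List (Int × Int)) :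
    isInducedSubGraph V E Vs Es = isInducedSubGraph_alt V E Vs Es := by
  rw [Bool.eq_iff_iff]
  simp [isInducedSubGraph, isInducedSubGraph_alt, isSubGraphA, isGraphA,
        PySem.Set.issubset_iff, PySem.Set.contains, PySem.Set.mem_ofList, List.all_eq_true,
        and_assoc]
  constructor
  · rintro ⟨hG, hV, hE, hP⟩
    refine ⟨hV, hG, hE, fun a b hab => ?_⟩
    by_cases ha : a ∈ Vs
    · by_cases hb : b ∈ Vs
      · have := hP a ha b hb; tauto
      · tauto
    · tauto
  · rintro ⟨hV, hG, hE, hEd⟩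
    refine ⟨hG, hV, hE, fun x hx y hy => ?_⟩
    by_cases hxy : x = y
    · tauto
    · by_cases hE1 : (x, y) ∈ E
      · have := hEd x y hE1; tauto
      · by_cases hE2 : (y, x) ∈ E
        · have := hEd y x hE2; tauto
        · tauto

-- ===== VERDICT (by name: the statement is the Claim_ definition above) =====
theorem isInducedSubGraph_spec : Claim_equal_isInducedSubGraph := by
  intro V E Vs Es _
  exact isInducedSubGraph_eq_alt V E Vs Es
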